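-- pv_equiv track=rewrite | github.com/Jadeiin/sam_ros | sam_fp/scripts/samros.py | get_indices_of_values_above_threshold
-- ===== SOURCE A (Python) =====
-- def get_indices_of_values_above_threshold(values, threshold):
--     # Pair each value with its index and filter by threshold
--     filtered_values_with_indices = []
--     filtered_values_with_indices = [
--         (i, v) for i, v in enumerate(values) if v > threshold
--     ]
--
--     # Sort the filtered pairs by value in descending order, then extract indices
--     sorted_indices = []
--     sorted_indices = [
--         i
--         for i, v in sorted(
--             filtered_values_with_indices, key=lambda x: x[1], reverse=True
--         )
--     ]
--
--     return sorted_indices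
-- ===== SOURCE B (Python) =====
-- def get_indices_of_values_above_threshold(values, threshold):
--     # One pass: maintain the answer as an ordered list of indices (values
--     # descending, ties in original index order) by linear insertion; values
--     # at or below the threshold are never inserted. No sorted() call, no
--     # intermediate (index, value) tuple list.
--     result = []
--     for i, v in enumerate(values):
--         if v > threshold:
--             pos = 0
--             while pos < len(result) and values[result[pos]] >= v:
--                 pos += 1
--             result.insert(pos, i)
--     return result
-- ===== Notes on version B (the rewrite author's own statement) =====
-- stated objective: alternative
-- what changed: B replaces A's three staged passes (build filtered (index,value) pairs, call the built-in stable sort, strip to indices) by a single left-to-right pass that maintains the answer directly as an ordered index list via linear insertion (insert each qualifying index after all entries with value >= its value); no sorted() call and no tuple list.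
import Mathlib
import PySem

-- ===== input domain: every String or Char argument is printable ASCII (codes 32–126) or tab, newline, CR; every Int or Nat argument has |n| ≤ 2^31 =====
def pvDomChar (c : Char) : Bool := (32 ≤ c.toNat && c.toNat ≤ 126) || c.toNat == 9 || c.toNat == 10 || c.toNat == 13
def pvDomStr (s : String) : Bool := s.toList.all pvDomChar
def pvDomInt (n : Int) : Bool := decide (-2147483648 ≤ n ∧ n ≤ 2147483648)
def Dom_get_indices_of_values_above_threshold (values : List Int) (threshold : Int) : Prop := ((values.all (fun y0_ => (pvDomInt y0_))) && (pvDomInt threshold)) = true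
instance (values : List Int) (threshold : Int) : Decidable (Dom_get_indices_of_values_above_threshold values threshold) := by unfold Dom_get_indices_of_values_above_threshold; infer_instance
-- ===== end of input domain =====

-- ===== PORT A =====
-- A: build the filtered (index, value) pairs, stable-sort them by value descending,
-- then extract the indices.
def get_indices_of_values_above_threshold (values : List Int) (threshold : Int) : List Int :=
  let filtered_values_with_indices : List (Int × Int) :=
    (PySem.List.enumerate values).filter (fun iv => decide (threshold < iv.2))
  let sorted_indices : List Int :=
    (PySem.List.sorted filtered_values_with_indices (fun x => x.2) true).map (fun iv => iv.1)
  sorted_indices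

-- ===== PORT B =====
-- B (one honest line): ONE pass with an ordered accumulator — each qualifying index is
-- linearly inserted into the result kept sorted by value descending (ties after their
-- equals, so in original index order); no sorted() call, no tuple list (objective: alternative).
-- the while/insert of Source B: walk past entries with values[result[pos]] >= v, insert i there
-- (indices stored in result are always in range, so pyGetD is exact for values[result[pos]])
def pvInsB (values : List Int) (v : Int) (i : Int) : List Int → List Int
  | [] => [i]
  | j :: t => if v ≤ PySem.List.pyGetD values j 0 then j :: pvInsB values v i t else i :: j :: t

def get_indices_of_values_above_threshold_alt (values : List Int) (threshold : Int) : List Int :=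
  (PySem.List.enumerate values).foldl
    (fun result iv => if threshold < iv.2 then pvInsB values iv.2 iv.1 result else result) []

-- ===== PRECONDITION & SPEC =====
def Spec_get_indices_of_values_above_threshold (values : List Int) (threshold : Int) (out : List Int) : Prop := out = get_indices_of_values_above_threshold_alt values threshold
instance (values : List Int) (threshold : Int) (out : List Int) : Decidable (Spec_get_indices_of_values_above_threshold values threshold out) := by unfold Spec_get_indices_of_values_above_threshold; infer_instance

-- ===== CLAIM =====
def Claim_equal_get_indices_of_values_above_threshold : Prop := ∀ (values : List Int) (threshold : Int), Dom_get_indices_of_values_above_threshold values threshold → Spec_get_indices_of_values_above_threshold values threshold (get_indices_of_values_above_threshold values threshold)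

-- ===== LEMMAS AND PROOFS =====

-- a fold whose step is guarded by `if p x` equals the unguarded fold over the filtered list
theorem pv_foldl_guard {α β : Type} (p : α → Prop) [DecidablePred p] (g : β → α → β)
    (xs : List α) (init : β) :
    xs.foldl (fun acc x => if p x then g acc x else acc) init
      = (xs.filter (fun x => decide (p x))).foldl g init := by
  induction xs generalizing init with
  | nil => rfl
  | cons x t ih =>
      by_cases h : p x <;> simp [h, ih]

-- on pairs that carry their own value (q.2 = values[q.1]), B's index insertion is
-- A's pair insertion seen through `map fst`
theorem pv_insB_map (values : List Int) (i v : Int) (ps : List (Int × Int))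
    (h : ∀ q ∈ ps, q.2 = PySem.List.pyGetD values q.1 0) :
    pvInsB values v i (ps.map (fun q => q.1))
      = (PySem.List.insertBy (fun a c => decide (c.2 < a.2)) ((i, v) : Int × Int) ps).map
          (fun q => q.1) := by
  induction ps with
  | nil => simp [pvInsB, PySem.List.insertBy]
  | cons q t ih =>
      have hq : q.2 = PySem.List.pyGetD values q.1 0 := h q (by simp)
      by_cases hlt : q.2 < v
      · simp [pvInsB, PySem.List.insertBy, hlt, ← hq, not_le.mpr hlt]
      · have hge : v ≤ PySem.List.pyGetD values q.1 0 := by rw [← hq]; omega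
        simp [pvInsB, PySem.List.insertBy, hlt, hge,
          ih (fun r hr => h r (by simp [hr]))]

-- folding B's insertion over the fst-projection = fst-projection of folding A's insertion
theorem pv_fold_insB_map (values : List Int) (ps : List (Int × Int)) (acc : List (Int × Int))
    (hps : ∀ q ∈ ps, q.2 = PySem.List.pyGetD values q.1 0)
    (hacc : ∀ q ∈ acc, q.2 = PySem.List.pyGetD values q.1 0) :
    ps.foldl (fun res iv => pvInsB values iv.2 iv.1 res) (acc.map (fun q => q.1))
      = (ps.foldl (fun res iv => PySem.List.insertBy (fun a c => decide (c.2 < a.2)) iv res)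
          acc).map (fun q => q.1) := by
  induction ps generalizing acc with
  | nil => rfl
  | cons x t ih =>
      have hx : x.2 = PySem.List.pyGetD values x.1 0 := hps x (by simp)
      simp only [List.foldl_cons]
      rw [pv_insB_map values x.1 x.2 acc hacc]
      refine ih _ (fun q hq => hps q (by simp [hq])) (fun q hq => ?_)
      rcases (PySem.List.mem_insertBy _ _ _ _).mp hq with h | h
      · exact h ▸ hx
      · exact hacc q h

-- every pair produced by enumerate carries its own value
theorem pv_enumerate_wf (values : List Int) :
    ∀ q ∈ PySem.List.enumerate values, q.2 = PySem.List.pyGetD values q.1 0 := by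
  intro q hq
  rcases (PySem.List.mem_enumerate_iff _ _ _).mp hq with ⟨k, hk, rfl⟩
  simp [PySem.List.pyGetD_natCast, List.getD_eq_getElem?_getD, hk]

-- ===== VERDICT =====
theorem get_indices_of_values_above_threshold_spec : Claim_equal_get_indices_of_values_above_threshold := by
  intro values threshold _
  unfold Spec_get_indices_of_values_above_threshold
  unfold get_indices_of_values_above_threshold get_indices_of_values_above_threshold_alt
  simp only []
  rw [PySem.List.sorted_rev_eq_foldl_insertBy,
    pv_foldl_guard (fun iv : Int × Int => threshold < iv.2)
      (fun res iv => pvInsB values iv.2 iv.1 res)]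
  have := pv_fold_insB_map values
    ((PySem.List.enumerate values).filter (fun iv => decide (threshold < iv.2))) []
    (fun q hq => pv_enumerate_wf values q (List.mem_of_mem_filter hq)) (by simp)
  simpa using this.symm
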